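-- pv_equiv track=rewrite | github.com/Psy-Tabakowa/S2-OS-L-KonradKaranowski | Lab4/memory/lru.py | get_optimal
-- ===== SOURCE A (Python) =====
-- from typing import List, Dict, Tuple
--
-- def get_optimal(recently_used_reversed: List[str], names: List[str]) -> str:
--     values = list()
--     for name in names:
--         i = 0
--         for rec in reversed(recently_used_reversed):
--             if rec == name:
--                 apd = (name, i)
--                 values.append(apd)
--                 break
--             i += 1
--     values.sort(key=lambda s: s[1])
--     return values[-1][0]
-- ===== SOURCE B (Python) =====
-- def get_optimal(recently_used_reversed, names):
--     first = {}
--     for j, rec in enumerate(reversed(recently_used_reversed)):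
--         if rec not in first:
--             first[rec] = j
--     candidates = [name for name in names if name in first]
--     return max(candidates, key=lambda name: first[name])
-- ===== Notes on version B (the rewrite author's own statement) =====
-- stated objective: faster
-- what changed: Replaces the per-name rescan of the reversed list plus a sort (collect (name, index) pairs, sort by index, take last) by one pass over the reversed list building a first-occurrence-index dict, then a single max(key=dict lookup) over the found names; ties under the key only occur between equal strings, so first-max equals A's stable-sort-last.
import Mathlib
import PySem

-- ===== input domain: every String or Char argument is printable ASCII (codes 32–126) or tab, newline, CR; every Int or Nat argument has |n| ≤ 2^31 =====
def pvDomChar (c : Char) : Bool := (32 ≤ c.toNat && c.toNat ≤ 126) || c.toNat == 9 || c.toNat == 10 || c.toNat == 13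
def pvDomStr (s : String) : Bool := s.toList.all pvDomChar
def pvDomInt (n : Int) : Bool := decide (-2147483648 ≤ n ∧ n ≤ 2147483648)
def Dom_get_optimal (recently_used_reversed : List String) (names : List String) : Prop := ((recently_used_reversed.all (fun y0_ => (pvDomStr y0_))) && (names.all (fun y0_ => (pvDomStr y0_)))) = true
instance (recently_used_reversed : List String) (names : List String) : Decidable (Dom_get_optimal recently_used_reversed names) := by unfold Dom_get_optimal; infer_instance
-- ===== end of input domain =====

-- B replaces A's per-name rescan of the reversed list + sort-by-index with one pass building a
-- first-occurrence-index dict and a single max(key=lookup); objective: faster (asymptotic).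


-- ===== PORT A =====
-- inner loop: 'i = 0; for rec in reversed(...): if rec == name: (name, i); break; i += 1'
def pvFindRec (l : List String) (name : String) (i : Int) : Option (String × Int) :=
  match l with
  | [] => none
  | rec :: rest => if rec == name then some (name, i) else pvFindRec rest name (i + 1)

def get_optimal (recently_used_reversed : List String) (names : List String) : String :=
  let values : List (String × Int) := names.foldl (fun acc name =>
    match pvFindRec recently_used_reversed.reverse name 0 with
    | some apd => acc ++ [apd]
    | none => acc) []
  let values := PySem.List.sorted values (fun s => s.2)
  match PySem.List.pyGet? values (-1) with   -- values[-1]; none = IndexError, excluded by Pre_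
  | some p => p.1
  | none => ""

-- ===== PORT B =====
def get_optimal_alt (recently_used_reversed : List String) (names : List String) : String :=
  let first : PySem.Dict String Int :=
    (PySem.List.enumerate recently_used_reversed.reverse 0).foldl
      (fun d p => if d.contains p.2 then d else d.insert p.2 p.1) PySem.Dict.empty
  let candidates := names.filter (fun name => first.contains name)
  -- max(candidates, key=lambda name: first[name]); 'first[name]' ported as getD: every candidate is a key
  match PySem.List.max? candidates (fun name => first.getD name 0) with
  | some m => m
  | none => ""   -- Python raises ValueError here; excluded by Pre_

-- ===== PRECONDITION & SPEC =====
-- Pre_ excludes exactly the inputs where no name occurs in the list: there Python A raises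
-- IndexError (values[-1] on []) and Python B raises ValueError (max of empty sequence).
def Pre_get_optimal (recently_used_reversed : List String) (names : List String) : Prop :=
  ∃ name ∈ names, name ∈ recently_used_reversed
instance (recently_used_reversed : List String) (names : List String) : Decidable (Pre_get_optimal recently_used_reversed names) := by unfold Pre_get_optimal; infer_instance

def pvWitness_get_optimal : List String × List String := (["a", "b"], ["b", "a"])

def Spec_get_optimal (recently_used_reversed : List String) (names : List String) (out : String) : Prop := out = get_optimal_alt recently_used_reversed names
instance (recently_used_reversed : List String) (names : List String) (out : String) : Decidable (Spec_get_optimal recently_used_reversed names out) := by unfold Spec_get_optimal; infer_instance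

-- ===== CLAIM (what is proved, stated in full; the proofs are below) =====
def Claim_equal_get_optimal : Prop := ∀ (recently_used_reversed : List String) (names : List String), Dom_get_optimal recently_used_reversed names → Pre_get_optimal recently_used_reversed names → Spec_get_optimal recently_used_reversed names (get_optimal recently_used_reversed names)

-- ===== LEMMAS AND PROOFS =====

-- A's inner loop is first-index search with an offset counter.
theorem pvFindRec_eq (l : List String) (name : String) (i : Int) :
    pvFindRec l name i = (List.idxOf? name l).map (fun k => (name, i + (k : Int))) := by
  induction l generalizing i with
  | nil => simp [pvFindRec]
  | cons x t ih =>
    by_cases h : x = name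
    · simp [pvFindRec, h, List.idxOf?_cons]
    · simp only [pvFindRec, beq_iff_eq, h, if_false, ih, List.idxOf?_cons,
        beq_iff_eq, Option.map_map]
      cases List.idxOf? name t <;> simp <;> ring

-- B's dict after the loop: first-occurrence index (offset s), unless the key was already present.
theorem pvDict_get (l : List String) (nm : String) : ∀ (s : Int) (d : PySem.Dict String Int),
    ((PySem.List.enumerate l s).foldl
      (fun d p => if d.contains p.2 then d else d.insert p.2 p.1) d).get? nm =
    match d.get? nm with
    | some v => some v
    | none => (List.idxOf? nm l).map (fun k => s + (k : Int)) := by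
  induction l with
  | nil => intro s d; cases h : d.get? nm <;> simp [PySem.List.enumerate, h]
  | cons x t ih =>
    intro s d
    rw [PySem.List.enumerate_cons, List.foldl_cons]
    by_cases hc : d.contains x = true
    · simp only [hc, if_true, ih]
      by_cases hx : x = nm
      · subst hx
        have : d.get? x ≠ none := by
          intro hn
          rw [PySem.Dict.contains_eq_isSome_get?, hn] at hc
          simp at hc
        cases h : d.get? x with
        | none => exact absurd h this
        | some v => simp
      · cases h : d.get? nm with
        | some v => simp [h]
        | none =>
          simp only [h, List.idxOf?_cons, beq_iff_eq, hx, if_false]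
          cases List.idxOf? nm t <;> simp <;> ring
    · have hc' : d.contains x = false := by simpa using hc
      simp only [hc', Bool.false_eq_true, if_false, ih]
      have hdx : d.get? x = none := by
        rw [PySem.Dict.contains_eq_isSome_get?] at hc
        cases h : d.get? x <;> simp [h] at hc ⊢
      by_cases hx : x = nm
      · subst hx
        simp [PySem.Dict.get?_insert_self, hdx, List.idxOf?_cons]
      · rw [PySem.Dict.get?_insert_of_ne _ _ (Ne.symm hx)]
        cases h : d.get? nm with
        | some v => simp [h]
        | none =>
          simp only [h, List.idxOf?_cons, beq_iff_eq, hx, if_false]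
          cases List.idxOf? nm t <;> simp <;> ring

-- A's accumulation loop over names, in closed form.
theorem pvValues_eq (L : List String) (names : List String) : ∀ (acc : List (String × Int)),
    names.foldl (fun acc name =>
      match pvFindRec L name 0 with
      | some apd => acc ++ [apd]
      | none => acc) acc =
    acc ++ (names.filter (fun nm => (List.idxOf? nm L).isSome)).map
      (fun nm => (nm, ((List.idxOf? nm L).getD 0 : Int))) := by
  induction names with
  | nil => simp
  | cons x t ih =>
    intro acc
    rw [List.foldl_cons, ih]
    rw [pvFindRec_eq]
    cases h : List.idxOf? x L with
    | none => simp [h]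
    | some k => simp [h]

-- key of the last element of a ≤-pairwise list dominates every key in it
theorem pvKey_getLast_max {α : Type} (key : α → Int) (l : List α) (h : l ≠ [])
    (hp : l.Pairwise (fun a b => key a ≤ key b)) : ∀ x ∈ l, key x ≤ key (l.getLast h) := by
  induction l with
  | nil => exact absurd rfl h
  | cons a t ih =>
    rcases List.pairwise_cons.mp hp with ⟨ha, ht⟩
    intro x hx
    by_cases htne : t = []
    · subst htne
      simp at hx
      simp [hx]
    · rw [List.getLast_cons htne]
      rcases List.mem_cons.mp hx with hxa | hxt
      · subst hxa
        exact ha _ (List.getLast_mem htne)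
      · exact ih htne ht x hxt

-- distinct strings have distinct first-occurrence indices
theorem pvIdx_inj {a b : String} {L : List String} {k : Nat}
    (ha : List.idxOf? a L = some k) (hb : List.idxOf? b L = some k) : a = b := by
  rcases List.idxOf?_eq_some_iff.mp ha with ⟨h1, h2, -⟩
  rcases List.idxOf?_eq_some_iff.mp hb with ⟨h1', h2', -⟩
  rw [← h2, ← h2']

theorem pv_main (recently_used_reversed names : List String) :
    get_optimal recently_used_reversed names = get_optimal_alt recently_used_reversed names := by
  unfold get_optimal get_optimal_alt
  simp only []
  set L := recently_used_reversed.reverse with hL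
  set fold : PySem.Dict String Int := (PySem.List.enumerate L 0).foldl
      (fun d p => if d.contains p.2 then d else d.insert p.2 p.1) PySem.Dict.empty with hfold
  have hget : ∀ nm, fold.get? nm = (List.idxOf? nm L).map (fun k => (k : Int)) := by
    intro nm
    rw [hfold, pvDict_get]
    cases List.idxOf? nm L <;> simp [PySem.Dict.get?_empty]
  have hcont : (fun nm => fold.contains nm) = (fun nm => (List.idxOf? nm L).isSome) := by
    funext nm
    rw [PySem.Dict.contains_eq_isSome_get?, hget nm]
    cases List.idxOf? nm L <;> simp
  have hgetD : (fun nm => fold.getD nm 0) = (fun nm => ((List.idxOf? nm L).getD 0 : Int)) := by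
    funext nm
    rw [PySem.Dict.getD_eq_get?_getD, hget nm]
    cases List.idxOf? nm L <;> simp
  rw [pvValues_eq L names [], List.nil_append, hcont, hgetD]
  set K : String → Int := fun nm => ((List.idxOf? nm L).getD 0 : Int) with hK
  set C : List String := names.filter (fun nm => (List.idxOf? nm L).isSome) with hC
  set vs : List (String × Int) := C.map (fun nm => (nm, K nm)) with hvs
  have hPC : ∀ nm ∈ C, (List.idxOf? nm L).isSome = true := by
    intro nm hnm
    rw [hC] at hnm
    exact (List.mem_filter.mp hnm).2
  rw [PySem.List.pyGet?_neg_one]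
  by_cases hCnil : C = []
  · have hvs0 : vs = [] := by simp [hvs, hCnil]
    have hs0 : PySem.List.sorted vs (fun s => s.2) = [] :=
      (PySem.List.sorted_eq_nil_iff vs _ false).mpr hvs0
    have hm0 : PySem.List.max? C K = none :=
      (PySem.List.max?_eq_none_iff C K).mpr hCnil
    rw [hs0, hm0]
    rfl
  · have hvsne : vs ≠ [] := by simp [hvs, hCnil]
    have hsne : PySem.List.sorted vs (fun s => s.2) ≠ [] := by
      intro h0
      exact hvsne ((PySem.List.sorted_eq_nil_iff vs _ false).mp h0)
    set srt := PySem.List.sorted vs (fun s => s.2) with hsrt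
    rw [List.getLast?_eq_some_getLast hsne]
    set p := srt.getLast hsne with hp
    obtain ⟨m, hm⟩ : ∃ m, PySem.List.max? C K = some m := by
      cases h : PySem.List.max? C K with
      | none => exact absurd ((PySem.List.max?_eq_none_iff C K).mp h) hCnil
      | some m => exact ⟨m, rfl⟩
    rw [hm]
    -- p comes from some candidate nma
    have hpvs : p ∈ vs := (PySem.List.mem_sorted vs (fun s => s.2) false p).mp (hp ▸ List.getLast_mem hsne)
    obtain ⟨nma, hnmaC, hpeq⟩ := List.mem_map.mp hpvs
    -- maximality on B's side
    have hmaxB : ∀ y ∈ C, K y ≤ K m := PySem.List.max?_isMax hm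
    have hmC : m ∈ C := PySem.List.max?_mem hm
    -- maximality on A's side
    have hmvs : (m, K m) ∈ vs := List.mem_map.mpr ⟨m, hmC, rfl⟩
    have hmsrt : (m, K m) ∈ srt := (PySem.List.mem_sorted vs (fun s => s.2) false (m, K m)).mpr hmvs
    have hpair : srt.Pairwise (fun a b => a.2 ≤ b.2) := PySem.List.sorted_pairwise vs _
    have hmaxA : K m ≤ p.2 :=
      pvKey_getLast_max (fun q => q.2) srt hsne hpair (m, K m) hmsrt
    have hp2 : p.2 = K nma := by rw [← hpeq]
    have hKeq : K nma = K m := le_antisymm (hmaxB nma hnmaC) (hp2 ▸ hmaxA)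
    -- the key is injective on candidates
    obtain ⟨ka, hka⟩ := Option.isSome_iff_exists.mp (hPC nma hnmaC)
    obtain ⟨km, hkm⟩ := Option.isSome_iff_exists.mp (hPC m hmC)
    have : ka = km := by
      have := hKeq
      rw [hK] at this
      simp only [hka, hkm, Option.getD_some] at this
      exact_mod_cast this
    have hnm_eq : nma = m := pvIdx_inj hka (this ▸ hkm)
    have hp1 : p.1 = nma := by rw [← hpeq]
    simp [hp1, hnm_eq]

-- ===== VERDICT (by name: the statement is the Claim_ definition above) =====
theorem get_optimal_spec : Claim_equal_get_optimal := by
  intro r n _ _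
  unfold Spec_get_optimal
  exact pv_main r n
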